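-- pv_equiv track=rewrite | github.com/wilmurillo-ai/Design-Assistant | .skills/openclaw-skills/skills/tristanmanchester/meta-ads-control/scripts/meta_ads.py | validate_create_payload
-- ===== SOURCE A (Python) =====
-- from typing import Any, Dict, Iterable, List, Optional, Tuple
--
-- def validate_create_payload(object_name: str, params: Dict[str, Any]) -> List[str]:
--     warnings: List[str] = []
--     object_name = object_name.lower()
--     if object_name in {"campaign", "campaigns"}:
--         if "name" not in params:
--             warnings.append("Campaign payload has no 'name'.")
--         if "objective" not in params:
--             warnings.append("Campaign payload has no 'objective'.")
--         if "status" not in params: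
--             warnings.append("Campaign payload has no 'status'. PAUSED is the safest default.")
--     elif object_name in {"adset", "adsets"}:
--         for key in ["campaign_id", "name"]:
--             if key not in params:
--                 warnings.append(f"Ad set payload has no '{key}'.")
--         if "daily_budget" not in params and "lifetime_budget" not in params:
--             warnings.append("Ad set payload has no budget. That can be valid under campaign budget optimisation, but verify intentionally.")
--         if "targeting" not in params:
--             warnings.append("Ad set payload has no 'targeting'.")
--         if "status" not in params:
--             warnings.append("Ad set payload has no 'status'. PAUSED is the safest default.")
--     elif object_name in {"adcreative", "adcreatives"}:
--         if "object_story_spec" not in params and "object_story_id" not in params and "asset_feed_spec" not in params: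
--             warnings.append("Creative payload has no object_story_spec, object_story_id, or asset_feed_spec.")
--     elif object_name in {"ad", "ads"}:
--         if "adset_id" not in params:
--             warnings.append("Ad payload has no 'adset_id'.")
--         if "creative" not in params:
--             warnings.append("Ad payload has no 'creative'.")
--         if "status" not in params:
--             warnings.append("Ad payload has no 'status'. PAUSED is the safest default.")
--     return warnings
-- ===== SOURCE B (Python) =====
-- # Declarative rule table: each rule = (tuple of alternative keys, warning); plural aliases share the rule list.
-- _CAMPAIGN = [
--     (("name",), "Campaign payload has no 'name'."),
--     (("objective",), "Campaign payload has no 'objective'."),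
--     (("status",), "Campaign payload has no 'status'. PAUSED is the safest default."),
-- ]
-- _ADSET = [
--     (("campaign_id",), "Ad set payload has no 'campaign_id'."),
--     (("name",), "Ad set payload has no 'name'."),
--     (("daily_budget", "lifetime_budget"), "Ad set payload has no budget. That can be valid under campaign budget optimisation, but verify intentionally."),
--     (("targeting",), "Ad set payload has no 'targeting'."),
--     (("status",), "Ad set payload has no 'status'. PAUSED is the safest default."),
-- ]
-- _CREATIVE = [
--     (("object_story_spec", "object_story_id", "asset_feed_spec"), "Creative payload has no object_story_spec, object_story_id, or asset_feed_spec."),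
-- ]
-- _AD = [
--     (("adset_id",), "Ad payload has no 'adset_id'."),
--     (("creative",), "Ad payload has no 'creative'."),
--     (("status",), "Ad payload has no 'status'. PAUSED is the safest default."),
-- ]
-- _RULES = {
--     "campaign": _CAMPAIGN, "campaigns": _CAMPAIGN,
--     "adset": _ADSET, "adsets": _ADSET,
--     "adcreative": _CREATIVE, "adcreatives": _CREATIVE,
--     "ad": _AD, "ads": _AD,
-- }
--
-- def validate_create_payload(object_name, params):
--     rules = _RULES.get(object_name.lower(), [])
--     return [msg for keys, msg in rules if not any(k in params for k in keys)]
-- ===== Notes on version B (the rewrite author's own statement) =====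
-- stated objective: idiomatic
-- what changed: Replaces the hardcoded if/elif branch chain with a declarative rule table (dict mapping each object name and its plural alias to ordered (alternative-keys, message) rules) consumed by one generic comprehension.
import Mathlib
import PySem

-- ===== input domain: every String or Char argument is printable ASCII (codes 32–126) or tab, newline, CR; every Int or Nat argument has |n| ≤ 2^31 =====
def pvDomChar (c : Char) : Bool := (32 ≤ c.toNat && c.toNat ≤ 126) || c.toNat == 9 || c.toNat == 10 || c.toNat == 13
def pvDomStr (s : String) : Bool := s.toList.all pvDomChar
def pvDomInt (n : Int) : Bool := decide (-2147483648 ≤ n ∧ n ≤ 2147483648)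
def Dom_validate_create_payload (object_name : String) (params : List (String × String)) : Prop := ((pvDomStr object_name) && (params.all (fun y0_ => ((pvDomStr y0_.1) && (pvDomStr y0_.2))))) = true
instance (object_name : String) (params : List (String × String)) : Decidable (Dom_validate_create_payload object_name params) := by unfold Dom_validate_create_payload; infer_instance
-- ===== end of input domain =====

-- B replaces A's if/elif chain with a declarative rule table looked up once; objective: idiomatic (same cost).

-- ===== PORT A =====
def validate_create_payload (object_name : String) (params : List (String × String)) : List String :=
  let warnings : List String := []
  let object_name := PySem.Str.lower object_name
  if object_name == "campaign" || object_name == "campaigns" then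
    let warnings := if !(PySem.Dict.mk params).contains "name" then warnings ++ ["Campaign payload has no 'name'."] else warnings
    let warnings := if !(PySem.Dict.mk params).contains "objective" then warnings ++ ["Campaign payload has no 'objective'."] else warnings
    let warnings := if !(PySem.Dict.mk params).contains "status" then warnings ++ ["Campaign payload has no 'status'. PAUSED is the safest default."] else warnings
    warnings
  else if object_name == "adset" || object_name == "adsets" then
    let warnings := ["campaign_id", "name"].foldl (fun w key =>
      if !(PySem.Dict.mk params).contains key then w ++ ["Ad set payload has no '" ++ key ++ "'."] else w) warnings
    let warnings := if !(PySem.Dict.mk params).contains "daily_budget" && !(PySem.Dict.mk params).contains "lifetime_budget" then warnings ++ ["Ad set payload has no budget. That can be valid under campaign budget optimisation, but verify intentionally."] else warnings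
    let warnings := if !(PySem.Dict.mk params).contains "targeting" then warnings ++ ["Ad set payload has no 'targeting'."] else warnings
    let warnings := if !(PySem.Dict.mk params).contains "status" then warnings ++ ["Ad set payload has no 'status'. PAUSED is the safest default."] else warnings
    warnings
  else if object_name == "adcreative" || object_name == "adcreatives" then
    if !(PySem.Dict.mk params).contains "object_story_spec" && !(PySem.Dict.mk params).contains "object_story_id" && !(PySem.Dict.mk params).contains "asset_feed_spec" then
      warnings ++ ["Creative payload has no object_story_spec, object_story_id, or asset_feed_spec."]
    else warnings
  else if object_name == "ad" || object_name == "ads" then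
    let warnings := if !(PySem.Dict.mk params).contains "adset_id" then warnings ++ ["Ad payload has no 'adset_id'."] else warnings
    let warnings := if !(PySem.Dict.mk params).contains "creative" then warnings ++ ["Ad payload has no 'creative'."] else warnings
    let warnings := if !(PySem.Dict.mk params).contains "status" then warnings ++ ["Ad payload has no 'status'. PAUSED is the safest default."] else warnings
    warnings
  else warnings

-- ===== PORT B =====
def vcpCampaignRules : List (List String × String) :=
  [(["name"], "Campaign payload has no 'name'."),
   (["objective"], "Campaign payload has no 'objective'."),
   (["status"], "Campaign payload has no 'status'. PAUSED is the safest default.")]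

def vcpAdsetRules : List (List String × String) :=
  [(["campaign_id"], "Ad set payload has no 'campaign_id'."),
   (["name"], "Ad set payload has no 'name'."),
   (["daily_budget", "lifetime_budget"], "Ad set payload has no budget. That can be valid under campaign budget optimisation, but verify intentionally."),
   (["targeting"], "Ad set payload has no 'targeting'."),
   (["status"], "Ad set payload has no 'status'. PAUSED is the safest default.")]

def vcpCreativeRules : List (List String × String) :=
  [(["object_story_spec", "object_story_id", "asset_feed_spec"], "Creative payload has no object_story_spec, object_story_id, or asset_feed_spec.")]

def vcpAdRules : List (List String × String) :=
  [(["adset_id"], "Ad payload has no 'adset_id'."),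
   (["creative"], "Ad payload has no 'creative'."),
   (["status"], "Ad payload has no 'status'. PAUSED is the safest default.")]

def vcpRules : PySem.Dict String (List (List String × String)) :=
  PySem.Dict.mk
    [("campaign", vcpCampaignRules), ("campaigns", vcpCampaignRules),
     ("adset", vcpAdsetRules), ("adsets", vcpAdsetRules),
     ("adcreative", vcpCreativeRules), ("adcreatives", vcpCreativeRules),
     ("ad", vcpAdRules), ("ads", vcpAdRules)]

def validate_create_payload_alt (object_name : String) (params : List (String × String)) : List String :=
  ((vcpRules.getD (PySem.Str.lower object_name) []).filter
      (fun r => !(r.1.any (fun k => (PySem.Dict.mk params).contains k)))).map (fun r => r.2)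

-- ===== PRECONDITION & SPEC =====
def Spec_validate_create_payload (object_name : String) (params : List (String × String)) (out : List String) : Prop := out = validate_create_payload_alt object_name params
instance (object_name : String) (params : List (String × String)) (out : List String) : Decidable (Spec_validate_create_payload object_name params out) := by unfold Spec_validate_create_payload; infer_instance

-- ===== CLAIM (what is proved, stated in full; the proofs are below) =====
def Claim_equal_validate_create_payload : Prop := ∀ (object_name : String) (params : List (String × String)), Dom_validate_create_payload object_name params → Spec_validate_create_payload object_name params (validate_create_payload object_name params)

-- ===== LEMMAS AND PROOFS =====

-- ===== VERDICT (by name: the statement is the Claim_ definition above) =====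
theorem validate_create_payload_spec : Claim_equal_validate_create_payload := by
  intro o p _
  unfold Spec_validate_create_payload validate_create_payload validate_create_payload_alt
  generalize PySem.Str.lower o = s
  by_cases h1 : s = "campaign"
  · subst h1
    cases hn : p.any (fun q => q.1 == "name") <;>
    cases ho : p.any (fun q => q.1 == "objective") <;>
    cases hs : p.any (fun q => q.1 == "status") <;>
    simp [vcpRules, vcpCampaignRules, PySem.Dict.getD, PySem.Dict.get?_mk_cons, PySem.Dict.contains, List.filter, hn, ho, hs]
  by_cases h2 : s = "campaigns"
  · subst h2
    cases hn : p.any (fun q => q.1 == "name") <;>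
    cases ho : p.any (fun q => q.1 == "objective") <;>
    cases hs : p.any (fun q => q.1 == "status") <;>
    simp [vcpRules, vcpCampaignRules, PySem.Dict.getD, PySem.Dict.get?_mk_cons, PySem.Dict.contains, List.filter, hn, ho, hs]
  by_cases h3 : s = "adset"
  · subst h3
    cases hc : p.any (fun q => q.1 == "campaign_id") <;>
    cases hn : p.any (fun q => q.1 == "name") <;>
    cases hd : p.any (fun q => q.1 == "daily_budget") <;>
    cases hl : p.any (fun q => q.1 == "lifetime_budget") <;>
    cases ht : p.any (fun q => q.1 == "targeting") <;>
    cases hs : p.any (fun q => q.1 == "status") <;>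
    simp [vcpRules, vcpAdsetRules, PySem.Dict.getD, PySem.Dict.get?_mk_cons, PySem.Dict.contains, List.filter, List.foldl, hc, hn, hd, hl, ht, hs]
  by_cases h4 : s = "adsets"
  · subst h4
    cases hc : p.any (fun q => q.1 == "campaign_id") <;>
    cases hn : p.any (fun q => q.1 == "name") <;>
    cases hd : p.any (fun q => q.1 == "daily_budget") <;>
    cases hl : p.any (fun q => q.1 == "lifetime_budget") <;>
    cases ht : p.any (fun q => q.1 == "targeting") <;>
    cases hs : p.any (fun q => q.1 == "status") <;>
    simp [vcpRules, vcpAdsetRules, PySem.Dict.getD, PySem.Dict.get?_mk_cons, PySem.Dict.contains, List.filter, List.foldl, hc, hn, hd, hl, ht, hs]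
  by_cases h5 : s = "adcreative"
  · subst h5
    cases ha : p.any (fun q => q.1 == "object_story_spec") <;>
    cases hb : p.any (fun q => q.1 == "object_story_id") <;>
    cases hf : p.any (fun q => q.1 == "asset_feed_spec") <;>
    simp [vcpRules, vcpCreativeRules, PySem.Dict.getD, PySem.Dict.get?_mk_cons, PySem.Dict.contains, List.filter, ha, hb, hf]
  by_cases h6 : s = "adcreatives"
  · subst h6
    cases ha : p.any (fun q => q.1 == "object_story_spec") <;>
    cases hb : p.any (fun q => q.1 == "object_story_id") <;>
    cases hf : p.any (fun q => q.1 == "asset_feed_spec") <;>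
    simp [vcpRules, vcpCreativeRules, PySem.Dict.getD, PySem.Dict.get?_mk_cons, PySem.Dict.contains, List.filter, ha, hb, hf]
  by_cases h7 : s = "ad"
  · subst h7
    cases ha : p.any (fun q => q.1 == "adset_id") <;>
    cases hc : p.any (fun q => q.1 == "creative") <;>
    cases hs : p.any (fun q => q.1 == "status") <;>
    simp [vcpRules, vcpAdRules, PySem.Dict.getD, PySem.Dict.get?_mk_cons, PySem.Dict.contains, List.filter, ha, hc, hs]
  by_cases h8 : s = "ads"
  · subst h8
    cases ha : p.any (fun q => q.1 == "adset_id") <;>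
    cases hc : p.any (fun q => q.1 == "creative") <;>
    cases hs : p.any (fun q => q.1 == "status") <;>
    simp [vcpRules, vcpAdRules, PySem.Dict.getD, PySem.Dict.get?_mk_cons, PySem.Dict.contains, List.filter, ha, hc, hs]
  simp [vcpRules, PySem.Dict.getD, h1, h2, h3, h4, h5, h6, h7, h8,
        Ne.symm h1, Ne.symm h2, Ne.symm h3, Ne.symm h4, Ne.symm h5, Ne.symm h6, Ne.symm h7, Ne.symm h8, PySem.Dict.get?]
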